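-- pv_equiv track=rewrite | github.com/JIKMAN/Algorithm | coding_test/kakao2020.py | solution
-- ===== SOURCE A (Python) =====
-- from math import ceil
--
-- def solution(s):
--     answer = []
--
--     for i in range(ceil(len(s) / 2)):
--         cut = i + 1
--         result = ""
--         tmp = s[:cut]
--         count = 1
--         for j in range(cut, len(s), cut):
--
--             if s[j:].startswith(tmp):
--                 count += 1
--             else:
--                 if count == 1:
--                     count = ""
--                 result += (str(count) + tmp)
--                 tmp = s[j:(j+cut)]
--                 count = 1
--         if count == 1:
--             count = ""
--         result += (str(count) + tmp)
--
--         answer.append(len(result))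
--
--     return min(answer)
-- ===== SOURCE B (Python) =====
-- def solution(s):
--     n = len(s)
--     # LCP table: lcp[i][j] = length of the longest common prefix of s[i:] and s[j:],
--     # built bottom-up, so each block-equality test below is one O(1) table lookup.
--     lcp = []
--     nxt = [0] * (n + 1)          # row for i = n (all zeros)
--     for i in range(n - 1, -1, -1):
--         row = [nxt[j + 1] + 1 if s[i] == s[j] else 0 for j in range(n)] + [0]
--         lcp = [row] + lcp
--         nxt = row
--     best = None
--     for c in range(1, (n + 1) // 2 + 1):
--         total, run, p = 0, 1, c
--         while p + c <= n:        # blocks at p-c and p are both full; equal iff lcp >= c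
--             if lcp[p - c][p] >= c:
--                 run += 1
--             else:
--                 total += c + (len(str(run)) if run > 1 else 0)
--                 run = 1
--             p += c
--         total += c + (len(str(run)) if run > 1 else 0)
--         if p < n:                # partial tail block, never equal to a full one
--             total += n - p
--         if best is None or total < best:
--             best = total
--     return best
-- ===== Notes on version B (the rewrite author's own statement) =====
-- stated objective: alternative
-- what changed: A compares blocks by slicing the suffix and running startswith for each position while concatenating the compressed string; B first precomputes a longest-common-prefix table lcp[i][j] over all suffix pairs in one bottom-up pass and then scans each cut size purely over block-start indices, deciding every block equality by a single O(1) table lookup and accumulating lengths arithmetically (no strings are built or compared in the scan).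
-- outside the precondition, e.g. on solution(''): A raises ValueError, B returns None
import Mathlib
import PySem

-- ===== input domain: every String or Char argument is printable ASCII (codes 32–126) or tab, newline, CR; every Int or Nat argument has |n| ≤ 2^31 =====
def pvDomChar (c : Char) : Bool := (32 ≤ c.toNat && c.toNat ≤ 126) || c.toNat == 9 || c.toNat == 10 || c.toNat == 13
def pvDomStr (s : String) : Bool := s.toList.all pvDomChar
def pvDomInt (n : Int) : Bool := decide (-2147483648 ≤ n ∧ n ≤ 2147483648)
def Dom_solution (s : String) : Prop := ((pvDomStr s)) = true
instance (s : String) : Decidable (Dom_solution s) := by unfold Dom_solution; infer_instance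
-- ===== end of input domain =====

-- B replaces A's per-cut string slicing and startswith re-comparison by a precomputed
-- LCP table (lcp[i][j] = common-prefix length of s[i:] and s[j:]), so each block-equality
-- test is a single O(1) table lookup over block start indices (objective: alternative).

-- ===== PORT A =====
-- body of A's inner loop: state (result, tmp, count), position j
def solA_step (cs : List Char) (cut : Int) (st : List Char × List Char × Int) (j : Int) :
    List Char × List Char × Int :=
  if PySem.Chars.startswith (PySem.List.slice cs (some j) none) st.2.1 then
    (st.1, st.2.1, st.2.2 + 1)
  else
    (st.1 ++ ((if st.2.2 == 1 then [] else PySem.Int.toChars st.2.2) ++ st.2.1),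
     PySem.List.slice cs (some j) (some (j + cut)), 1)

-- one iteration of A's outer loop: len(result) for the given cut
def solA_percut (cs : List Char) (cut : Int) : Int :=
  let st := (PySem.List.pyRange cut (cs.length : Int) cut).foldl (solA_step cs cut)
      (([] : List Char), PySem.List.slice cs none (some cut), (1 : Int))
  ((st.1 ++ ((if st.2.2 == 1 then [] else PySem.Int.toChars st.2.2) ++ st.2.1)).length : Int)

def solution (s : String) : Int :=
  -- math.ceil(len(s)/2) on the nonnegative int len(s) is exactly (len(s)+1)/2
  let answer := (PySem.List.pyRange 0 (((s.toList.length + 1) / 2 : Nat) : Int) 1).foldl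
      (fun answer i => answer ++ [solA_percut s.toList (i + 1)]) []
  -- min(answer) raises ValueError on an empty list; Pre_solution excludes s = ""
  (PySem.List.min? answer (fun x => x)).getD 0

-- ===== PORT B =====
-- len(str(run)) if run > 1 else 0
def solB_dig (run : Int) : Int :=
  if 1 < run then ((PySem.Int.toChars run).length : Int) else 0

-- row = [nxt[j+1] + 1 if s[i] == s[j] else 0 for j in range(n)] + [0]
-- (nxt[j+1] is always in range in B, so the total pyGetD is exact here)
def solB_row (cs : List Char) (nxt : List Int) (i : Int) : List Int :=
  ((PySem.List.pyRange 0 (cs.length : Int) 1).map (fun j =>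
      if PySem.List.pyGet? cs i == PySem.List.pyGet? cs j
      then PySem.List.pyGetD nxt (j + 1) 0 + 1 else 0)) ++ [0]

-- one iteration of B's row loop: row = ...; lcp = [row] + lcp; nxt = row
def solB_step (cs : List Char) (st : List (List Int) × List Int) (i : Int) :
    List (List Int) × List Int :=
  let row := solB_row cs st.2 i
  (row :: st.1, row)

-- while p + c <= n: one O(1) LCP lookup per pair of adjacent blocks
-- (both indices are always in range in B, so the total pyGetD is exact here;
--  the 0 < c conjunct only makes the recursion total — B is called with c ≥ 1)
def solB_while (lcp : List (List Int)) (n c : Int) (total run p : Int) : Int × Int × Int :=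
  if h : 0 < c ∧ p + c ≤ n then
    if c ≤ PySem.List.pyGetD (PySem.List.pyGetD lcp (p - c) []) p 0 then
      solB_while lcp n c total (run + 1) (p + c)
    else
      solB_while lcp n c (total + c + solB_dig run) 1 (p + c)
  else (total, run, p)
termination_by (n - p).toNat
decreasing_by all_goals omega

-- B's body of the cut loop: the while, the final run emission, the partial tail block
def solB_percut (lcp : List (List Int)) (n c : Int) : Int :=
  let r := solB_while lcp n c 0 1 c
  if r.2.2 < n then r.1 + c + solB_dig r.2.1 + (n - r.2.2)
  else r.1 + c + solB_dig r.2.1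

-- if best is None or total < best: best = total
def solB_best (best : Option Int) (total : Int) : Option Int :=
  match best with
  | none => some total
  | some b => if total < b then some total else some b

def solution_alt (s : String) : Int :=
  let cs := s.toList
  let n : Int := (cs.length : Int)
  -- for i in range(n-1, -1, -1): build the LCP rows bottom-up
  let st := (PySem.List.pyRange (n - 1) (-1) (-1)).foldl (solB_step cs)
      ([], List.replicate (cs.length + 1) 0)
  -- (n+1)//2 on the nonnegative int n is exactly Nat division
  -- B returns None on s = "" (outside Pre_solution, where A raises); the getD 0 is never read there
  ((PySem.List.pyRange 1 ((((cs.length + 1) / 2 : Nat) : Int) + 1) 1).foldl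
      (fun best c => solB_best best (solB_percut st.1 n c)) none).getD 0

-- ===== PRECONDITION & SPEC =====
-- Pre_ excludes only s = "": there A's min([]) raises ValueError (and B returns None, not an int).
def Pre_solution (s : String) : Prop := s ≠ ""
instance (s : String) : Decidable (Pre_solution s) := by unfold Pre_solution; infer_instance
def pvWitness_solution : String := "aabbaccc"

def Spec_solution (s : String) (out : Int) : Prop := out = solution_alt s
instance (s : String) (out : Int) : Decidable (Spec_solution s out) := by unfold Spec_solution; infer_instance

-- ===== CLAIM (what is proved, stated in full; the proofs are below) =====
def Claim_equal_solution : Prop := ∀ (s : String), Dom_solution s → Pre_solution s → Spec_solution s (solution s)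

-- ===== LEMMAS AND PROOFS =====

-- length of the longest common prefix (what B's table holds, per the proof below)
def lcpLen : List Char → List Char → Nat
  | a :: as, b :: bs => if a = b then lcpLen as bs + 1 else 0
  | _, _ => 0

theorem lcpLen_nil_right (a : List Char) : lcpLen a [] = 0 := by
  cases a <;> rfl

-- A's inner loop rephrased over the list of chunks (proof helper)
def runA : List (List Char) → List Char × List Char × Int → List Char
  | [], st => st.1 ++ ((if st.2.2 == 1 then [] else PySem.Int.toChars st.2.2) ++ st.2.1)
  | ch :: rest, st =>
      if ch == st.2.1 then runA rest (st.1, st.2.1, st.2.2 + 1)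
      else runA rest (st.1 ++ ((if st.2.2 == 1 then [] else PySem.Int.toChars st.2.2) ++ st.2.1), ch, 1)

-- compressed length over a chunk list, recursively (proof helper bridging runA and solB_while)
def runB : List (List Char) → List Char → Int → Int → Int
  | [], prev, total, run => total + (prev.length : Int) + solB_dig run
  | cur :: rest, prev, total, run =>
      if cur == prev then runB rest cur total (run + 1)
      else runB rest cur (total + (prev.length : Int) + solB_dig run) 1

theorem pr_nil (a b s : Int) (hs : 0 < s) (h : b ≤ a) :
    PySem.List.pyRange a b s = [] := by
  rw [PySem.List.pyRange_of_pos a b hs, if_neg (by omega)]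
  rfl

theorem pr_cons (a b s : Int) (hs : 0 < s) (h : a < b) :
    PySem.List.pyRange a b s = a :: PySem.List.pyRange (a + s) b s := by
  rw [PySem.List.pyRange_of_pos a b hs, PySem.List.pyRange_of_pos (a + s) b hs, if_pos h]
  have hadd : b - a + s - 1 = (b - a - 1) + 1 * s := by ring
  have hdiv : (b - a + s - 1) / s = (b - a - 1) / s + 1 := by
    rw [hadd, Int.add_mul_ediv_right _ _ (by omega)]
  have hnn : 0 ≤ (b - a - 1) / s := Int.ediv_nonneg (by omega) (by omega)
  rw [hdiv]
  have h2n : ((b - a - 1) / s + 1).toNat = ((b - a - 1) / s).toNat + 1 := by omega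
  rw [h2n, List.range_succ_eq_map, List.map_cons, List.map_map]
  by_cases h2 : a + s < b
  · rw [if_pos h2]
    have h3 : b - (a + s) + s - 1 = b - a - 1 := by ring
    rw [h3]
    congr 1
    · simp
    · apply List.map_congr_left
      intro k _
      simp [Function.comp, Nat.succ_eq_add_one]
      ring
  · rw [if_neg h2]
    have h0 : (b - a - 1) / s = 0 := Int.ediv_eq_zero_of_lt (by omega) (by omega)
    simp [h0]

theorem startswith_take (d tmp : List Char) (cut : Nat) (hl : tmp.length = cut) :
    PySem.Chars.startswith d tmp = (d.take cut == tmp) := by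
  rw [Bool.eq_iff_iff]
  rw [PySem.Chars.startswith_iff, beq_iff_eq, List.prefix_iff_eq_take, hl, eq_comm]

theorem cstr_dig (count : Int) (h : 1 ≤ count) :
    (((if count == 1 then [] else PySem.Int.toChars count) : List Char).length : Int)
      = solB_dig count := by
  by_cases h1 : count = 1
  · simp [h1, solB_dig]
  · have : 1 < count := by omega
    simp [h1, this, solB_dig]

theorem runB_add (rest : List (List Char)) (x : Int) :
    ∀ (prev : List Char) (t run : Int),
      runB rest prev (x + t) run = x + runB rest prev t run := by
  induction rest with
  | nil => intro prev t run; simp [runB]; ring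
  | cons cur rest ih =>
      intro prev t run
      simp only [runB]
      split
      · exact ih cur t (run + 1)
      · have h : x + t + (prev.length : Int) + solB_dig run
            = x + (t + (prev.length : Int) + solB_dig run) := by ring
        rw [h, ih]

theorem runA_runB (rest : List (List Char)) :
    ∀ (result tmp : List Char) (count : Int), 1 ≤ count →
      ((runA rest (result, tmp, count)).length : Int)
        = (result.length : Int) + runB rest tmp 0 count := by
  induction rest with
  | nil =>
      intro result tmp count h
      simp [runA, runB, ← cstr_dig count h]
      ring
  | cons ch rest ih =>
      intro result tmp count h
      simp only [runA, runB]
      by_cases hc : ch = tmp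
      · subst hc
        simp only [BEq.rfl, if_true]
        exact ih result ch (count + 1) (by omega)
      · have hb : (ch == tmp) = false := by simp [hc]
        simp only [hb, Bool.false_eq_true, if_false]
        rw [ih _ ch 1 (by omega)]
        have h2 : (0 : Int) + (tmp.length : Int) + solB_dig count
            = ((tmp.length : Int) + solB_dig count) + 0 := by ring
        rw [h2, runB_add]
        simp [← cstr_dig count h]
        ring

-- A's fold over the positions equals runA over the corresponding chunks
theorem foldA_runA (cs : List Char) (cut : Nat) (hc : 1 ≤ cut) :
    ∀ (fuel j : Nat), cs.length - j ≤ fuel →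
      ∀ (result tmp : List Char) (count : Int), (j < cs.length → tmp.length = cut) →
      (fun st : List Char × List Char × Int =>
          st.1 ++ ((if st.2.2 == 1 then [] else PySem.Int.toChars st.2.2) ++ st.2.1))
        ((PySem.List.pyRange (j : Int) (cs.length : Int) (cut : Int)).foldl
          (solA_step cs (cut : Int)) (result, tmp, count))
      = runA ((PySem.List.pyRange (j : Int) (cs.length : Int) (cut : Int)).map
          (fun p => PySem.List.slice cs (some p) (some (p + (cut : Int))))) (result, tmp, count) := by
  intro fuel
  induction fuel with
  | zero =>
      intro j hf result tmp count hl
      rw [pr_nil _ _ _ (by exact_mod_cast hc) (by exact_mod_cast (by omega : cs.length ≤ j))]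
      rfl
  | succ fuel ih =>
      intro j hf result tmp count hl
      by_cases hj : j < cs.length
      · rw [pr_cons (j : Int) (cs.length : Int) (cut : Int) (by exact_mod_cast hc)
            (by exact_mod_cast hj)]
        have hcast : ((j : Int) + (cut : Int)) = ((j + cut : Nat) : Int) := by push_cast; ring
        have hchunk : PySem.List.slice cs (some (j : Int)) (some ((j : Int) + (cut : Int)))
            = (cs.drop j).take cut := PySem.List.slice_natCast_add cs j cut
        simp only [List.foldl_cons, List.map_cons]
        have hstep : solA_step cs (cut : Int) (result, tmp, count) (j : Int)
            = if ((cs.drop j).take cut == tmp) then (result, tmp, count + 1)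
              else (result ++ ((if count == 1 then [] else PySem.Int.toChars count) ++ tmp),
                    (cs.drop j).take cut, 1) := by
          simp only [solA_step, PySem.List.slice_from_natCast,
            startswith_take (cs.drop j) tmp cut (hl hj), hchunk]
        rw [hstep, hchunk]
        simp only [runA]
        by_cases hcnd : (cs.drop j).take cut = tmp
        · have hb : ((cs.drop j).take cut == tmp) = true := by simp [hcnd]
          simp only [hb, if_true]
          rw [hcast]
          exact ih (j + cut) (by omega) result tmp (count + 1) (fun _ => hl hj)
        · have hb : ((cs.drop j).take cut == tmp) = false := by simp [hcnd]
          simp only [hb, Bool.false_eq_true, if_false]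
          rw [hcast]
          exact ih (j + cut) (by omega) _ _ 1
            (fun _ => by simp [List.length_take, List.length_drop]; omega)
      · rw [pr_nil _ _ _ (by exact_mod_cast hc) (by exact_mod_cast (by omega : cs.length ≤ j))]
        rfl

-- beta-reduced restatement (a shape that appears in the goals)
theorem foldA_runA' (cs : List Char) (cut : Nat) (hc : 1 ≤ cut)
    (fuel j : Nat) (hf : cs.length - j ≤ fuel)
    (result tmp : List Char) (count : Int) (hl : j < cs.length → tmp.length = cut) :
      ((PySem.List.pyRange (j : Int) (cs.length : Int) (cut : Int)).foldl
          (solA_step cs (cut : Int)) (result, tmp, count)).1 ++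
        ((if (((PySem.List.pyRange (j : Int) (cs.length : Int) (cut : Int)).foldl
          (solA_step cs (cut : Int)) (result, tmp, count)).2.2 == 1) = true then []
          else PySem.Int.toChars (((PySem.List.pyRange (j : Int) (cs.length : Int) (cut : Int)).foldl
          (solA_step cs (cut : Int)) (result, tmp, count)).2.2)) ++
         ((PySem.List.pyRange (j : Int) (cs.length : Int) (cut : Int)).foldl
          (solA_step cs (cut : Int)) (result, tmp, count)).2.1)
      = runA ((PySem.List.pyRange (j : Int) (cs.length : Int) (cut : Int)).map
          (fun p => PySem.List.slice cs (some p) (some (p + (cut : Int))))) (result, tmp, count) :=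
  foldA_runA cs cut hc fuel j hf result tmp count hl

-- ---- B-side lemmas: the LCP table is correct, and the while loop computes runB ----

theorem take_eq_iff_lcpLen :
    ∀ (c : Nat) (a b : List Char), c ≤ a.length → c ≤ b.length →
      (a.take c = b.take c ↔ c ≤ lcpLen a b) := by
  intro c
  induction c with
  | zero => intro a b _ _; simp
  | succ c ih =>
      intro a b ha hb
      cases a with
      | nil => simp at ha
      | cons x as =>
          cases b with
          | nil => simp at hb
          | cons y bs =>
              simp only [List.take_succ_cons, List.length_cons] at *
              by_cases hxy : x = y
              · subst hxy
                rw [(by rw [lcpLen, if_pos rfl] :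
                      lcpLen (x :: as) (x :: bs) = lcpLen as bs + 1)]
                simp only [List.cons.injEq, true_and]
                rw [ih as bs (by omega) (by omega)]
                omega
              · rw [(by rw [lcpLen, if_neg hxy] :
                      lcpLen (x :: as) (y :: bs) = 0)]
                constructor
                · intro h; exact absurd (List.cons.injEq .. ▸ h).1 hxy
                · omega

-- one comprehension row of B's table is correct, given the row below is
theorem row_getD (cs : List Char) (nxt : List Int) (i : Nat) (hi : i < cs.length)
    (hn : ∀ j : Nat, nxt.getD j 0 = (lcpLen (cs.drop (i + 1)) (cs.drop j) : Int)) :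
    ∀ j : Nat, (solB_row cs nxt (i : Int)).getD j 0 = (lcpLen (cs.drop i) (cs.drop j) : Int) := by
  intro j
  have hmap : solB_row cs nxt (i : Int)
      = ((List.range cs.length).map (fun j : Nat =>
          if cs[i]? == cs[j]? then nxt.getD (j + 1) 0 + 1 else 0)) ++ [0] := by
    unfold solB_row
    rw [PySem.List.pyRange_one]
    simp only [sub_zero, Int.toNat_natCast, List.map_map]
    congr 1
    apply List.map_congr_left
    intro k _
    have h1 : ((0 : Int) + (k : Int)) = ((k : Nat) : Int) := by push_cast; ring
    have h2 : ((k : Int) + 1) = ((k + 1 : Nat) : Int) := by push_cast; ring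
    simp only [Function.comp_apply, h1, h2, PySem.List.pyGet?_natCast,
      PySem.List.pyGetD_natCast]
  rw [hmap]
  by_cases hj : j < cs.length
  · rw [List.getD_eq_getElem?_getD, List.getElem?_append_left (by simpa using hj)]
    simp only [List.getElem?_map, List.getElem?_range hj, Option.map_some, Option.getD_some]
    have hdi : cs.drop i = cs[i] :: cs.drop (i + 1) := (List.getElem_cons_drop hi).symm
    have hdj : cs.drop j = cs[j] :: cs.drop (j + 1) := (List.getElem_cons_drop hj).symm
    have hii : cs[i]? = some cs[i] := List.getElem?_eq_getElem hi
    have hjj : cs[j]? = some cs[j] := List.getElem?_eq_getElem hj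
    rw [hii, hjj, hdi, hdj]
    rw [(by rw [lcpLen] : lcpLen (cs[i] :: cs.drop (i + 1)) (cs[j] :: cs.drop (j + 1))
          = if cs[i] = cs[j] then lcpLen (cs.drop (i + 1)) (cs.drop (j + 1)) + 1 else 0)]
    by_cases hx : cs[i] = cs[j]
    · rw [if_pos (by simp [hx]), if_pos hx, hn (j + 1)]
      push_cast
      ring
    · rw [if_neg (by simp [hx]), if_neg hx]
      simp
  · have hz : lcpLen (cs.drop i) (cs.drop j) = 0 := by
      rw [show cs.drop j = ([] : List Char) from List.drop_eq_nil_of_le (by omega),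
        lcpLen_nil_right]
    rw [hz]
    by_cases hje : j = cs.length
    · subst hje
      rw [List.getD_eq_getElem?_getD, List.getElem?_append_right (by simp)]
      simp
    · rw [List.getD_eq_getElem?_getD, List.getElem?_eq_none (by simp; omega)]
      simp

-- the downward fold over range(n-1, -1, -1) fills the whole table correctly
theorem build_invariant (cs : List Char) :
    ∀ (t : Nat) (k : Int), (k + 1).toNat ≤ t → -1 ≤ k → k ≤ (cs.length : Int) - 1 →
      ∀ (st : List (List Int) × List Int),
      (∀ j : Nat, st.2.getD j 0 = (lcpLen (cs.drop (k + 1).toNat) (cs.drop j) : Int)) →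
      (∀ m j : Nat, ((st.1.getD m []).getD j 0)
          = (lcpLen (cs.drop ((k + 1).toNat + m)) (cs.drop j) : Int)) →
      ∀ m j : Nat,
        ((((PySem.List.pyRange k (-1) (-1)).foldl (solB_step cs) st).1.getD m []).getD j 0)
          = (lcpLen (cs.drop m) (cs.drop j) : Int) := by
  intro t
  induction t with
  | zero =>
      intro k hk hk1 hk2 st ha hb m j
      have hkn : k = -1 := by omega
      rw [hkn, PySem.List.pyRange_neg_one_eq_nil (by omega), List.foldl_nil]
      have := hb m j
      simpa [hkn] using this
  | succ t ih =>
      intro k hk hk1 hk2 st ha hb m j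
      by_cases hkn : k = -1
      · rw [hkn, PySem.List.pyRange_neg_one_eq_nil (by omega), List.foldl_nil]
        have := hb m j
        simpa [hkn] using this
      · have hk0 : 0 ≤ k := by omega
        rw [PySem.List.pyRange_neg_one_cons (by omega : (-1 : Int) < k), List.foldl_cons]
        have hkk : k = ((k.toNat : Nat) : Int) := by omega
        have hrow : ∀ j : Nat, (solB_row cs st.2 k).getD j 0
            = (lcpLen (cs.drop k.toNat) (cs.drop j) : Int) := by
          rw [hkk]
          exact row_getD cs st.2 k.toNat (by omega)
            (by intro j; have := ha j; rwa [(by omega : (k + 1).toNat = k.toNat + 1)] at this)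
        have ha' : ∀ j : Nat, (solB_step cs st k).2.getD j 0
            = (lcpLen (cs.drop (k - 1 + 1).toNat) (cs.drop j) : Int) := by
          intro j
          simp only [solB_step]
          rw [(by omega : (k - 1 + 1).toNat = k.toNat)]
          exact hrow j
        have hb' : ∀ m j : Nat, (((solB_step cs st k).1.getD m []).getD j 0)
            = (lcpLen (cs.drop ((k - 1 + 1).toNat + m)) (cs.drop j) : Int) := by
          intro m j
          simp only [solB_step]
          cases m with
          | zero =>
              simp only [List.getD_cons_zero]
              rw [(by omega : (k - 1 + 1).toNat + 0 = k.toNat)]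
              exact hrow j
          | succ m =>
              simp only [List.getD_cons_succ]
              rw [(by omega : (k - 1 + 1).toNat + (m + 1) = (k + 1).toNat + m)]
              exact hb m j
        exact ih (k - 1) (by omega) (by omega) (by omega) _ ha' hb' m j

theorem beq_false_of_length_ne {a b : List Char} (h : a.length ≠ b.length) :
    (a == b) = false := by
  rw [beq_eq_false_iff_ne]
  intro he
  exact h (he ▸ rfl)

-- the while loop over block starts computes runB over the chunk list
theorem while_runB (cs : List Char) (table : List (List Int))
    (ht : ∀ m j : Nat, ((table.getD m []).getD j 0) = (lcpLen (cs.drop m) (cs.drop j) : Int))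
    (c : Nat) (hc : 1 ≤ c) :
    ∀ (fuel p : Nat), cs.length - p ≤ fuel → c ≤ p → p ≤ cs.length → ∀ (total run : Int),
      (if (solB_while table (cs.length : Int) (c : Int) total run (p : Int)).2.2 < (cs.length : Int)
       then (solB_while table (cs.length : Int) (c : Int) total run (p : Int)).1 + c
            + solB_dig (solB_while table (cs.length : Int) (c : Int) total run (p : Int)).2.1
            + ((cs.length : Int)
               - (solB_while table (cs.length : Int) (c : Int) total run (p : Int)).2.2)
       else (solB_while table (cs.length : Int) (c : Int) total run (p : Int)).1 + c
            + solB_dig (solB_while table (cs.length : Int) (c : Int) total run (p : Int)).2.1)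
      = runB ((PySem.List.pyRange (p : Int) (cs.length : Int) (c : Int)).map
            (fun q => PySem.List.slice cs (some q) (some (q + (c : Int)))))
          ((cs.drop (p - c)).take c) total run := by
  intro fuel
  induction fuel with
  | zero =>
      intro p hf hcp hpn total run
      -- fuel 0 means p = n, so the while guard is false and the range is empty
      have hpe : p = cs.length := by omega
      rw [solB_while]
      rw [dif_neg (by push_cast; omega)]
      rw [pr_nil _ _ _ (by exact_mod_cast hc) (by exact_mod_cast (by omega : cs.length ≤ p))]
      simp only [List.map_nil, runB]
      have hlen : ((cs.drop (p - c)).take c).length = c := by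
        simp [List.length_take, List.length_drop]; omega
      -- r.2.2 = p = n: not < n
      rw [if_neg (by push_cast; omega), hlen]
  | succ fuel ih =>
      intro p hf hcp hpn total run
      by_cases hcont : p + c ≤ cs.length
      · -- one more full block at p
        rw [solB_while, dif_pos (⟨by exact_mod_cast hc, by push_cast; omega⟩ :
            (0 : Int) < (c : Int) ∧ (p : Int) + (c : Int) ≤ (cs.length : Int))]
        rw [pr_cons (p : Int) (cs.length : Int) (c : Int) (by exact_mod_cast hc)
            (by push_cast; omega)]
        simp only [List.map_cons]
        have hchunk : PySem.List.slice cs (some (p : Int)) (some ((p : Int) + (c : Int)))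
            = (cs.drop p).take c := PySem.List.slice_natCast_add cs p c
        have hlook : PySem.List.pyGetD (PySem.List.pyGetD table ((p : Int) - (c : Int)) []) (p : Int) 0
            = (lcpLen (cs.drop (p - c)) (cs.drop p) : Int) := by
          have hcast : ((p : Int) - (c : Int)) = ((p - c : Nat) : Int) := by push_cast [hcp]; ring
          rw [hcast, PySem.List.pyGetD_natCast, PySem.List.pyGetD_natCast]
          exact ht (p - c) p
        have hprevlen : ((cs.drop (p - c)).take c).length = c := by
          simp [List.length_take, List.length_drop]; omega
        have hcurlen : ((cs.drop p).take c).length = c := by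
          simp [List.length_take, List.length_drop]; omega
        have heqiff : ((cs.drop p).take c == (cs.drop (p - c)).take c)
            = decide ((c : Int) ≤ (lcpLen (cs.drop (p - c)) (cs.drop p) : Int)) := by
          rw [Bool.eq_iff_iff, beq_iff_eq, decide_eq_true_iff]
          have := take_eq_iff_lcpLen c (cs.drop (p - c)) (cs.drop p)
            (by simp [List.length_drop]; omega) (by simp [List.length_drop]; omega)
          rw [eq_comm, this]
          exact_mod_cast Iff.rfl
        have hpc : ((p : Int) + (c : Int)) = ((p + c : Nat) : Int) := by push_cast; ring
        rw [hchunk]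
        simp only [runB, heqiff, hlook]
        by_cases hle : (c : Int) ≤ (lcpLen (cs.drop (p - c)) (cs.drop p) : Int)
        · rw [if_pos hle]
          simp only [decide_eq_true hle, if_true]
          rw [hpc]
          have := ih (p + c) (by omega) (by omega) (by omega) total (run + 1)
          rw [this, (by omega : p + c - c = p)]
        · rw [if_neg hle]
          simp only [decide_eq_false hle, Bool.false_eq_true, if_false]
          rw [hpc, hprevlen]
          have := ih (p + c) (by omega) (by omega) (by omega) (total + (c : Int) + solB_dig run) 1
          rw [this, (by omega : p + c - c = p)]
      · -- while stops; either exactly at the end, or a partial tail block remains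
        rw [solB_while, dif_neg (by push_cast; omega)]
        have hprevlen : ((cs.drop (p - c)).take c).length = c := by
          simp [List.length_take, List.length_drop]; omega
        by_cases hpend : p < cs.length
        · -- partial tail block s[p:p+c], shorter than c, never equal to a full block
          rw [pr_cons (p : Int) (cs.length : Int) (c : Int) (by exact_mod_cast hc)
              (by push_cast; omega)]
          rw [pr_nil ((p : Int) + (c : Int)) _ _ (by exact_mod_cast hc) (by push_cast; omega)]
          have hchunk : PySem.List.slice cs (some (p : Int)) (some ((p : Int) + (c : Int)))
              = (cs.drop p).take c := PySem.List.slice_natCast_add cs p c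
          simp only [List.map_cons, List.map_nil, hchunk, runB]
          have htail : ((cs.drop p).take c).length = cs.length - p := by
            simp [List.length_take, List.length_drop]; omega
          rw [beq_false_of_length_ne (by rw [htail, hprevlen]; omega)]
          simp only [Bool.false_eq_true, if_false]
          rw [if_pos (by push_cast; omega), hprevlen, htail]
          have hdig1 : solB_dig 1 = 0 := by norm_num [solB_dig]
          rw [hdig1, Nat.cast_sub (by omega : p ≤ cs.length)]
          ring
        · -- p = n exactly
          rw [pr_nil _ _ _ (by exact_mod_cast hc) (by exact_mod_cast (by omega : cs.length ≤ p))]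
          simp only [List.map_nil, runB]
          rw [if_neg (by push_cast; omega), hprevlen]

-- per-cut equality: A's string-building pass and B's LCP-scan agree
theorem percut_eq (cs : List Char) (table : List (List Int))
    (ht : ∀ m j : Nat, ((table.getD m []).getD j 0) = (lcpLen (cs.drop m) (cs.drop j) : Int))
    (c : Nat) (h1 : 1 ≤ c) (h2 : c ≤ cs.length) :
    solA_percut cs (c : Int) = solB_percut table (cs.length : Int) (c : Int) := by
  have htmp : PySem.List.slice cs none (some (c : Int)) = cs.take c :=
    PySem.List.slice_to_natCast cs c
  have hlen : (cs.take c).length = c := by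
    simp [List.length_take]; omega
  have hA := foldA_runA' cs c h1 cs.length c (by omega) [] (cs.take c) 1 (fun _ => hlen)
  have hB := while_runB cs table ht c h1 cs.length c (by omega) (by omega) (by omega) 0 1
  have htake0 : (cs.drop (c - c)).take c = cs.take c := by
    rw [(by omega : c - c = 0), List.drop_zero]
  rw [htake0] at hB
  simp only [solA_percut, solB_percut, htmp]
  rw [hA, runA_runB _ [] (cs.take c) 1 (by omega), ← hB]
  simp

theorem fold_min (l : List Int) (f : Int → Int) :
    (l.foldl (fun best c => solB_best best (f c)) none)
      = PySem.List.min? (l.map f) (fun x => x) := by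
  have step : ∀ (t : List Int) (b : Int),
      (t.foldl (fun best c => solB_best best (f c)) (some b))
      = some (t.foldl (fun b c => min b (f c)) b) := by
    intro t
    induction t with
    | nil => intro b; rfl
    | cons x t ih =>
        intro b
        simp only [List.foldl_cons]
        have h : solB_best (some b) (f x) = some (min b (f x)) := by
          simp only [solB_best, min_def]
          split_ifs <;> first | rfl | (exfalso; omega)
        rw [h, ih]
  cases l with
  | nil => rfl
  | cons x t =>
      simp only [List.map_cons, PySem.List.min?_id_cons, List.foldl_cons, List.foldl_map]
      exact step t (f x)

theorem pr_range0 (M : Nat) :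
    PySem.List.pyRange 0 (M : Int) 1 = (List.range M).map (fun k : Nat => (k : Int)) := by
  cases M with
  | zero => rw [pr_nil _ _ _ one_pos (by omega)]; rfl
  | succ M =>
      rw [PySem.List.pyRange_of_pos _ _ one_pos, if_pos (by push_cast; omega)]
      have h1 : ((((M + 1 : Nat) : Int) - 0 + 1 - 1) / 1).toNat = M + 1 := by
        push_cast
        simp
      rw [h1]
      apply List.map_congr_left
      intro k _
      simp

theorem pr_range1 (M : Nat) :
    PySem.List.pyRange 1 ((M : Int) + 1) 1 = (List.range M).map (fun k : Nat => (k : Int) + 1) := by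
  cases M with
  | zero => rw [pr_nil _ _ _ one_pos (by omega)]; rfl
  | succ M =>
      rw [PySem.List.pyRange_of_pos _ _ one_pos, if_pos (by push_cast; omega)]
      have h1 : (((((M + 1 : Nat) : Int)) + 1 - 1 + 1 - 1) / 1).toNat = M + 1 := by
        push_cast
        simp
      rw [h1]
      apply List.map_congr_left
      intro k _
      simp [add_comm]

theorem main_eq (s : String) (hpre : s ≠ "") : solution s = solution_alt s := by
  have hne : s.toList ≠ [] := by
    intro h
    exact hpre (String.toList_eq_nil_iff.mp h)
  have hn : 1 ≤ s.toList.length := List.length_pos_iff.mpr hne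
  -- B's table is correct
  have htab := build_invariant s.toList s.toList.length ((s.toList.length : Int) - 1)
      (by omega) (by omega) (by omega)
      ([], List.replicate (s.toList.length + 1) 0)
      (by
        intro j
        have hz : (List.replicate (s.toList.length + 1) (0 : Int)).getD j 0 = 0 := by
          rw [List.getD_eq_getElem?_getD, List.getElem?_replicate]
          split <;> rfl
        rw [hz, List.drop_eq_nil_of_le
          (by omega : s.toList.length ≤ (((s.toList.length : Int) - 1 + 1).toNat))]
        simp [lcpLen])
      (by
        intro m j
        simp only [List.getD_nil]
        rw [List.drop_eq_nil_of_le (by omega : s.toList.length ≤ (((s.toList.length : Int) - 1 + 1).toNat + m))]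
        simp [lcpLen])
  simp only [solution, solution_alt]
  rw [PySem.List.foldl_append_singleton_eq_map (fun i => solA_percut s.toList (i + 1))]
  rw [fold_min _ (fun cut => solB_percut _ _ cut)]
  rw [List.nil_append, pr_range0, pr_range1, List.map_map, List.map_map]
  congr 1
  congr 1
  apply List.map_congr_left
  intro k hk
  simp only [Function.comp_apply, List.mem_range] at hk ⊢
  have hcast : ((k : Int) + 1) = ((k + 1 : Nat) : Int) := by push_cast; ring
  rw [hcast]
  exact percut_eq s.toList _ htab (k + 1) (by omega) (by omega)

-- ===== VERDICT (by name: the statement is the Claim_ definition above) =====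
theorem solution_spec : Claim_equal_solution := by
  intro s _ hpre
  unfold Spec_solution
  exact main_eq s hpre
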